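-- pv_equiv track=rewrite | github.com/ridiculouz/TaG | src/evaluation.py | get_cluster_mapping
-- ===== SOURCE A (Python) =====
-- def get_cluster_mapping(pred: list, gold: list):
--     """
--     Input in sample format. Get the mapping dict from pred to gold.
--     Pred has already been converted by span_mapping.
--     Cluster format: [...set of span index...]
--     """
--     cluster_mapping = {}
--     tp = 0
--     pred = [set(cluster) for cluster in pred]
--     gold = [set(cluster) for cluster in gold]
--     for i_p, pc in enumerate(pred):
--         for i_g, gc in enumerate(gold):
--             if pc == gc:
--                 cluster_mapping[i_p] = i_g
--                 tp += 1
--                 break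
--         if i_p not in cluster_mapping:
--             cluster_mapping[i_p] = -1
--     return tp, cluster_mapping
-- ===== SOURCE B (Python) =====
-- def get_cluster_mapping(pred: list, gold: list):
--     first = {}
--     for j, gold_cluster in enumerate(gold):
--         first.setdefault(tuple(sorted(set(gold_cluster))), j)
--     cluster_mapping = {}
--     tp = 0
--     for i, pc in enumerate(pred):
--         j = first.get(tuple(sorted(set(pc))), -1)
--         cluster_mapping[i] = j
--         if j >= 0:
--             tp += 1
--     return tp, cluster_mapping
-- ===== Notes on version B (the rewrite author's own statement) =====
-- stated objective: alternative
-- what changed: Replaces the nested scan of gold for every pred cluster by a dict built once over gold, keyed by a canonical sorted-deduplicated tuple of each cluster (keeping the first gold index), so each pred cluster is a single lookup.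
import Mathlib
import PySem

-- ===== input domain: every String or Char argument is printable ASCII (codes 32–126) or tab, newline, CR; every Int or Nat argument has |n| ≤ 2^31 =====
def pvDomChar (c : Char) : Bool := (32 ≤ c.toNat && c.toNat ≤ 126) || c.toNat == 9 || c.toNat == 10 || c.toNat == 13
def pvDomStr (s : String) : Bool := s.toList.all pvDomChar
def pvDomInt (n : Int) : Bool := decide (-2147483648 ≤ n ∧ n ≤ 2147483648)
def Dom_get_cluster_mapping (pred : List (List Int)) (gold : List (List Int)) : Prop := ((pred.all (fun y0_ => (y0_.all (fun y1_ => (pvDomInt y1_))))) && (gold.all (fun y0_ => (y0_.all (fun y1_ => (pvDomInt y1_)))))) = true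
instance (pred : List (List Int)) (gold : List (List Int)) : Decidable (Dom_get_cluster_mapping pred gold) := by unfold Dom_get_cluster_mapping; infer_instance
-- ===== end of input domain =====

-- B replaces A's per-pred nested scan of gold by a single lookup in a dict built once
-- over gold, keyed by a canonical (sorted, deduplicated) form of each cluster (first index wins).

-- ===== PORT A =====
-- the inner 'for i_g, gc in enumerate(gold): if pc == gc: …; break' loop
def pvInnerA (gg : List (Int × PySem.Set Int)) (pc : PySem.Set Int) (tp : Int)
    (cm : PySem.Dict Int Int) (ip : Int) : Int × PySem.Dict Int Int :=
  match gg with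
  | [] => (tp, cm)
  | (ig, gc) :: rest =>
      if PySem.Set.equal pc gc then (tp + 1, cm.insert ip ig)
      else pvInnerA rest pc tp cm ip

def get_cluster_mapping (pred : List (List Int)) (gold : List (List Int)) : Int × (List (Int × Int)) :=
  let pred' := pred.map (fun c => PySem.Set.ofList c)
  let gold' := gold.map (fun c => PySem.Set.ofList c)
  let r := (PySem.List.enumerate pred').foldl
    (fun (st : Int × PySem.Dict Int Int) p =>
      let r1 := pvInnerA (PySem.List.enumerate gold') p.2 st.1 st.2 p.1
      if r1.2.contains p.1 then r1 else (r1.1, r1.2.insert p.1 (-1)))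
    (0, PySem.Dict.empty)
  (r.1, r.2.items)

-- ===== PORT B =====
-- tuple(sorted(set(c))): the canonical key
def pvCanon (c : List Int) : List Int :=
  PySem.List.sorted (PySem.Set.ofList c) (fun x => x) false

def pvBuildIndex (gold : List (List Int)) : PySem.Dict (List Int) Int :=
  (PySem.List.enumerate gold).foldl
    (fun d p => d.setdefault (pvCanon p.2) p.1) PySem.Dict.empty

def get_cluster_mapping_alt (pred : List (List Int)) (gold : List (List Int)) : Int × (List (Int × Int)) :=
  let first := pvBuildIndex gold
  let r := (PySem.List.enumerate pred).foldl
    (fun (st : Int × PySem.Dict Int Int) p =>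
      let j := first.getD (pvCanon p.2) (-1)
      let cm := st.2.insert p.1 j
      (if j ≥ 0 then st.1 + 1 else st.1, cm))
    (0, PySem.Dict.empty)
  (r.1, r.2.items)

-- ===== PRECONDITION & SPEC =====
def Spec_get_cluster_mapping (pred : List (List Int)) (gold : List (List Int)) (out : Int × (List (Int × Int))) : Prop := out = get_cluster_mapping_alt pred gold
instance (pred : List (List Int)) (gold : List (List Int)) (out : Int × (List (Int × Int))) : Decidable (Spec_get_cluster_mapping pred gold out) := by unfold Spec_get_cluster_mapping; infer_instance

-- ===== CLAIM (what is proved, stated in full; the proofs are below) =====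
def Claim_equal_get_cluster_mapping : Prop := ∀ (pred : List (List Int)) (gold : List (List Int)), Dom_get_cluster_mapping pred gold → Spec_get_cluster_mapping pred gold (get_cluster_mapping pred gold)

-- ===== LEMMAS AND PROOFS =====

-- first gold index (counting from s) whose cluster equals c as a set
def pvFirstIdx (gold : List (List Int)) (s : Int) (k : List Int) : Option Int :=
  match gold with
  | [] => none
  | g :: t => if pvCanon g = k then some s else pvFirstIdx t (s + 1) k

lemma pvCanon_eq_iff (x y : List Int) :
    pvCanon x = pvCanon y ↔ PySem.Set.equal (PySem.Set.ofList x) (PySem.Set.ofList y) = true := by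
  rw [PySem.Set.equal_iff]
  constructor
  · intro h z
    have hx : z ∈ pvCanon x ↔ z ∈ PySem.Set.ofList x := by
      simp [pvCanon, PySem.List.mem_sorted]
    have hy : z ∈ pvCanon y ↔ z ∈ PySem.Set.ofList y := by
      simp [pvCanon, PySem.List.mem_sorted]
    rw [← hx, ← hy, h]
  · intro h
    have hperm : (PySem.Set.ofList x).Perm (PySem.Set.ofList y) := by
      rw [List.perm_ext_iff_of_nodup (PySem.Set.nodup_ofList x) (PySem.Set.nodup_ofList y)]
      exact h
    exact PySem.List.sorted_eq_sorted_of_perm _ _ _ (fun a b hab => hab) hperm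

lemma pvFirstIdx_lower (gold : List (List Int)) (s : Int) (k : List Int) (ig : Int)
    (h : pvFirstIdx gold s k = some ig) : s ≤ ig := by
  induction gold generalizing s with
  | nil => simp [pvFirstIdx] at h
  | cons g t ih =>
    simp only [pvFirstIdx] at h
    split at h
    · simp only [Option.some.injEq] at h; omega
    · have := ih (s + 1) h; omega

lemma pvInnerA_eq_firstIdx (gold : List (List Int)) (pc : List Int) (s tp : Int)
    (cm : PySem.Dict Int Int) (ip : Int) :
    pvInnerA (PySem.List.enumerate (gold.map (fun c => PySem.Set.ofList c)) s)
        (PySem.Set.ofList pc) tp cm ip =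
      match pvFirstIdx gold s (pvCanon pc) with
      | some ig => (tp + 1, cm.insert ip ig)
      | none => (tp, cm) := by
  induction gold generalizing s with
  | nil => simp [pvInnerA, pvFirstIdx, PySem.List.enumerate_nil]
  | cons g t ih =>
    simp only [List.map_cons, PySem.List.enumerate_cons, pvInnerA, pvFirstIdx]
    by_cases h : pvCanon g = pvCanon pc
    · have heq : PySem.Set.equal (PySem.Set.ofList pc) (PySem.Set.ofList g) = true := by
        rw [← pvCanon_eq_iff]; exact h.symm
      simp [heq, h]
    · have hne : PySem.Set.equal (PySem.Set.ofList pc) (PySem.Set.ofList g) = false := by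
        rw [Bool.eq_false_iff]
        intro hc
        exact h ((pvCanon_eq_iff g pc).mpr (by rw [PySem.Set.equal_iff] at hc ⊢; intro z; exact (hc z).symm))
      simp [hne, h, ih]

lemma pvBuildIndex_get (gold : List (List Int)) (s : Int) (d : PySem.Dict (List Int) Int) (k : List Int) :
    ((PySem.List.enumerate gold s).foldl (fun d p => d.setdefault (pvCanon p.2) p.1) d).get? k
      = (d.get? k).or (pvFirstIdx gold s k) := by
  induction gold generalizing s d with
  | nil => simp [PySem.List.enumerate_nil, pvFirstIdx]
  | cons g t ih =>
    simp only [PySem.List.enumerate_cons, List.foldl_cons, pvFirstIdx]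
    by_cases hc : d.contains (pvCanon g) = true
    · rw [PySem.Dict.setdefault_of_contains _ _ hc, ih]
      have : ∃ v, d.get? (pvCanon g) = some v := by
        cases hv : d.get? (pvCanon g) with
        | none => rw [PySem.Dict.get?_eq_none_iff_contains] at hv; simp [hv] at hc
        | some v => exact ⟨v, rfl⟩
      by_cases hk : pvCanon g = k
      · subst hk; obtain ⟨v, hv⟩ := this; simp [hv]
      · simp [hk]
    · rw [PySem.Dict.setdefault_of_not_contains _ _ (by simpa using hc), ih]
      have hnone : d.get? (pvCanon g) = none := by
        rw [PySem.Dict.get?_eq_none_iff_contains]; simpa using hc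
      by_cases hk : pvCanon g = k
      · subst hk; simp [PySem.Dict.get?_insert_self, hnone]
      · rw [PySem.Dict.get?_insert_of_ne _ _ (fun h => hk h.symm)]
        simp [hk]

lemma pv_outer (pred gold : List (List Int)) (s tp : Int) (cm : PySem.Dict Int Int)
    (hinv : ∀ k ∈ cm.keys, k < s) :
    (PySem.List.enumerate (pred.map (fun c => PySem.Set.ofList c)) s).foldl
      (fun (st : Int × PySem.Dict Int Int) p =>
        let r1 := pvInnerA (PySem.List.enumerate (gold.map (fun c => PySem.Set.ofList c))) p.2 st.1 st.2 p.1
        if r1.2.contains p.1 then r1 else (r1.1, r1.2.insert p.1 (-1)))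
      (tp, cm)
    = (PySem.List.enumerate pred s).foldl
      (fun (st : Int × PySem.Dict Int Int) p =>
        let j := (pvBuildIndex gold).getD (pvCanon p.2) (-1)
        let cm' := st.2.insert p.1 j
        (if j ≥ 0 then st.1 + 1 else st.1, cm'))
      (tp, cm) := by
  induction pred generalizing s tp cm with
  | nil => simp [PySem.List.enumerate_nil]
  | cons pc t ih =>
    simp only [List.map_cons, PySem.List.enumerate_cons, List.foldl_cons]
    have hb : (pvBuildIndex gold).get? (pvCanon pc) = pvFirstIdx gold 0 (pvCanon pc) := by
      rw [pvBuildIndex, pvBuildIndex_get]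
      simp [PySem.Dict.get?_empty]
    have hnc : cm.contains s = false := by
      rw [Bool.eq_false_iff]
      intro h
      have := hinv s ((PySem.Dict.contains_iff_mem_keys _ _).mp h)
      omega
    rw [pvInnerA_eq_firstIdx]
    cases hf : pvFirstIdx gold 0 (pvCanon pc) with
    | some ig =>
      have hig : (0:Int) ≤ ig := pvFirstIdx_lower gold 0 _ ig hf
      have hgd : (pvBuildIndex gold).getD (pvCanon pc) (-1) = ig := by
        rw [PySem.Dict.getD_eq_get?_getD, hb, hf]; rfl
      simp only [hgd, PySem.Dict.contains_insert_self, if_true, ge_iff_le, hig]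
      exact ih (s + 1) (tp + 1) (cm.insert s ig)
        (by intro k hk
            rcases (PySem.Dict.mem_keys_insert _ _ _ _).mp hk with h | h
            · omega
            · have := hinv k h; omega)
    | none =>
      have hgd : (pvBuildIndex gold).getD (pvCanon pc) (-1) = -1 := by
        rw [PySem.Dict.getD_eq_get?_getD, hb, hf]; rfl
      simp only [hgd, hnc]
      have : ¬ ((-1:Int) ≥ 0) := by omega
      simp only [if_neg this]
      exact ih (s + 1) tp (cm.insert s (-1))
        (by intro k hk
            rcases (PySem.Dict.mem_keys_insert _ _ _ _).mp hk with h | h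
            · omega
            · have := hinv k h; omega)

-- ===== VERDICT (by name: the statement is the Claim_ definition above) =====
theorem get_cluster_mapping_spec : Claim_equal_get_cluster_mapping := by
  intro pred gold _
  unfold Spec_get_cluster_mapping get_cluster_mapping get_cluster_mapping_alt
  have h := pv_outer pred gold 0 0 PySem.Dict.empty (by intro k hk; simp [PySem.Dict.keys_empty] at hk)
  simp only at h ⊢
  rw [h]
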